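-- pv_equiv track=rewrite | github.com/b-vitamins/bibmgr | bibmgr/operations/policies/merge.py | _merge_authors
-- ===== SOURCE A (Python) =====
-- def _merge_authors(values: list[str]) -> str:
--     """Smart merge for author/editor fields."""
--     if not values:
--         return ""
--
--     all_authors = []
--     for value in values:
--         if value:
--             authors = [a.strip() for a in value.split(" and ")]
--             all_authors.extend(authors)
--
--     author_groups = {}
--     for author in all_authors:
--         if "," in author:
--             last_name = author.split(",")[0].strip().lower()
--         else:
--             parts = author.split()
--             last_name = parts[-1].lower() if parts else ""
--
--         if last_name not in author_groups:
--             author_groups[last_name] = []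
--         author_groups[last_name].append(author)
--
--     unique_authors = []
--     for last_name, variants in author_groups.items():
--         variants.sort(key=len, reverse=True)
--         unique_authors.append(variants[0])
--
--     return " and ".join(unique_authors)
-- ===== SOURCE B (Python) =====
-- def _merge_authors(values: list[str]) -> str:
--     """Smart merge for author/editor fields: one pass keeping the longest variant per last name."""
--     best = {}
--     for value in values:
--         if value:
--             for raw in value.split(" and "):
--                 author = raw.strip()
--                 if "," in author:
--                     last_name = author.split(",")[0].strip().lower()
--                 else:
--                     parts = author.split()
--                     last_name = parts[-1].lower() if parts else ""
--                 if last_name not in best or len(author) > len(best[last_name]):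
--                     best[last_name] = author
--     return " and ".join(best.values())
-- ===== Notes on version B (the rewrite author's own statement) =====
-- stated objective: simpler
-- what changed: A collects all author variants into per-last-name groups and then stable reverse-sorts each group by length to pick its first element; B does a single pass that keeps only the current longest variant per last name (strict '>' so ties keep the first-seen variant), with no grouping lists and no sort.
import Mathlib
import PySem

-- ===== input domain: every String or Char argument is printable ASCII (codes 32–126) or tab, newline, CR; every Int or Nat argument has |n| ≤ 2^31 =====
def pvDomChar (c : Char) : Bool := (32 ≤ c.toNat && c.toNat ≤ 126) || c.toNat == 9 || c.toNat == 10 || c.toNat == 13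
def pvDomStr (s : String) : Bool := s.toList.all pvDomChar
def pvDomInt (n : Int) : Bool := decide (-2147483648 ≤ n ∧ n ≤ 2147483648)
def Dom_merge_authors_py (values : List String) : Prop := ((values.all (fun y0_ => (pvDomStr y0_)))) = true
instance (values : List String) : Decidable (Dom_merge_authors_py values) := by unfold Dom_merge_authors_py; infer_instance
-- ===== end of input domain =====

-- B replaces A's group-all-variants-then-stable-sort-each-group pass by a single pass that keeps
-- only the current longest variant per last name (strict '>' preserves A's first-seen tie-break):
-- objective: simpler (one pass, no per-group sort).

-- ===== PORT A =====
-- last-name key: identical snippet in both Python sources ("," branch / last word branch)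
def pvLastName (author : String) : String :=
  if PySem.Str.isIn "," author then
    PySem.Str.lower (PySem.Str.strip (((PySem.Str.split? author ",").getD []).headD ""))
  else
    match PySem.List.pyGet? (PySem.Str.split₀ author) (-1) with
    | some p => PySem.Str.lower p
    | none => ""

-- A's grouping loop body: author_groups[last_name] (default []) gets author appended
def pvStepA (d : PySem.Dict String (List String)) (author : String) : PySem.Dict String (List String) :=
  PySem.Dict.modify d (pvLastName author) [] (fun vs => vs ++ [author])

def merge_authors_py (values : List String) : String :=
  if values = [] then "" else
    let all_authors := values.foldl (fun acc value =>
      if value ≠ "" then acc ++ ((PySem.Str.split? value " and ").getD []).map PySem.Str.strip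
      else acc) []
    let groups := all_authors.foldl pvStepA PySem.Dict.empty
    let unique := groups.items.foldl (fun acc p =>
      acc ++ [(PySem.List.sorted p.2 PySem.Str.len true).headD ""]) []
    PySem.Str.join " and " unique

-- ===== PORT B =====
-- B's loop body: best[ln] = author when ln absent or author strictly longer
def pvStepB (d : PySem.Dict String String) (author : String) : PySem.Dict String String :=
  if !(d.contains (pvLastName author)) || PySem.Str.len (d.getD (pvLastName author) "") < PySem.Str.len author
  then d.insert (pvLastName author) author else d

def merge_authors_py_alt (values : List String) : String :=
  let best := values.foldl (fun d value =>
    if value ≠ "" then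
      ((PySem.Str.split? value " and ").getD []).foldl (fun d raw => pvStepB d (PySem.Str.strip raw)) d
    else d) PySem.Dict.empty
  PySem.Str.join " and " best.values

-- ===== PRECONDITION & SPEC =====
def Spec_merge_authors_py (values : List String) (out : String) : Prop := out = merge_authors_py_alt values
instance (values : List String) (out : String) : Decidable (Spec_merge_authors_py values out) := by unfold Spec_merge_authors_py; infer_instance

-- ===== CLAIM (what is proved, stated in full; the proofs are below) =====
def Claim_equal_merge_authors_py : Prop := ∀ (values : List String), Dom_merge_authors_py values → Spec_merge_authors_py values (merge_authors_py values)

-- ===== LEMMAS AND PROOFS =====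

-- first element of A's reverse length-sort of a group = first-seen longest variant
def pvPick (vs : List String) : String := (PySem.List.sorted vs PySem.Str.len true).headD ""
def pvMax2 (b a : String) : String := if PySem.Str.len b < PySem.Str.len a then a else b
def pvBf (x y : String) : Bool := decide (PySem.Str.len y < PySem.Str.len x)
def pvF (p : String × List String) : String × String := (p.1, pvPick p.2)

lemma pv_foldl_insertBy_headD : ∀ (t : List String) (y : String) (ys : List String),
    (t.foldl (fun acc x => PySem.List.insertBy pvBf x acc) (y :: ys)).headD "" = t.foldl pvMax2 y := by
  intro t
  induction t with
  | nil => intro y ys; rfl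
  | cons x t ih =>
    intro y ys
    simp only [List.foldl_cons]
    by_cases hb : y.length < x.length
    · rw [show PySem.List.insertBy pvBf x (y :: ys) = x :: y :: ys by
        simp [PySem.List.insertBy, pvBf, hb]]
      rw [ih x (y :: ys)]
      simp [pvMax2, hb]
    · rw [show PySem.List.insertBy pvBf x (y :: ys) = y :: PySem.List.insertBy pvBf x ys by
        simp [PySem.List.insertBy, pvBf, hb]]
      rw [ih y _]
      simp [pvMax2, hb]

lemma pv_pick_cons (v : String) (t : List String) : pvPick (v :: t) = t.foldl pvMax2 v := by
  unfold pvPick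
  rw [PySem.List.sorted_rev_eq_foldl_insertBy]
  simp only [List.foldl_cons]
  rw [show PySem.List.insertBy (fun a b => decide (PySem.Str.len b < PySem.Str.len a)) v [] = [v] by
    simp [PySem.List.insertBy]]
  exact pv_foldl_insertBy_headD t v []

lemma pv_pick_append (vs : List String) (h : vs ≠ []) (a : String) :
    pvPick (vs ++ [a]) = pvMax2 (pvPick vs) a := by
  cases vs with
  | nil => exact absurd rfl h
  | cons v t =>
    rw [List.cons_append, pv_pick_cons, pv_pick_cons, List.foldl_append]
    rfl

def pvInv (g : PySem.Dict String (List String)) (b : PySem.Dict String String) : Prop :=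
  b.items = g.items.map pvF ∧ (g.items.map Prod.fst).Nodup ∧ ∀ p ∈ g.items, p.2 ≠ []

lemma pv_fst_inj {α β : Type} {l : List (α × β)} (h : (l.map Prod.fst).Nodup)
    {p q : α × β} (hp : p ∈ l) (hq : q ∈ l) (he : p.1 = q.1) : p = q := by
  induction l with
  | nil => cases hp
  | cons r t ih =>
    rw [List.map_cons, List.nodup_cons] at h
    obtain ⟨h1, h2⟩ := h
    rcases List.mem_cons.mp hp with hp1 | hp2 <;> rcases List.mem_cons.mp hq with hq1 | hq2
    · rw [hp1, hq1]
    · exfalso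
      have hm : q.1 ∈ t.map Prod.fst := List.mem_map_of_mem hq2
      rw [hp1] at he
      rw [← he] at hm
      exact h1 hm
    · exfalso
      have hm : p.1 ∈ t.map Prod.fst := List.mem_map_of_mem hp2
      rw [hq1] at he
      rw [he] at hm
      exact h1 hm
    · exact ih h2 hp2 hq2

lemma pv_step_inv (g : PySem.Dict String (List String)) (b : PySem.Dict String String)
    (a : String) (h : pvInv g b) : pvInv (pvStepA g a) (pvStepB b a) := by
  obtain ⟨hbg, hnd, hne⟩ := h
  have hcont : b.contains (pvLastName a) = g.contains (pvLastName a) := by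
    rw [PySem.Dict.contains, PySem.Dict.contains, hbg, List.any_map]
    rfl
  by_cases hc : g.contains (pvLastName a) = true
  · -- key already present
    have hex : ∃ p ∈ g.items, (p.1 == pvLastName a) = true := by
      simpa [PySem.Dict.contains, List.any_eq_true] using hc
    obtain ⟨p0, hp0, hpk⟩ := hex
    have hpk' : p0.1 = pvLastName a := by simpa using hpk
    have hmem : (pvLastName a, p0.2) ∈ g.items := by rw [← hpk']; exact hp0
    have hgnd : g.keys.Nodup := by simpa [PySem.Dict.keys] using hnd
    have hvs : g.getD (pvLastName a) [] = p0.2 :=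
      PySem.Dict.getD_of_mem_items g hmem hgnd []
    have hbnd : b.keys.Nodup := by
      simp only [PySem.Dict.keys, hbg, List.map_map]
      simpa [Function.comp, pvF] using hnd
    have hbmem : (pvLastName a, pvPick p0.2) ∈ b.items := by
      rw [hbg]; exact List.mem_map_of_mem hmem
    have hbget : b.getD (pvLastName a) "" = pvPick p0.2 :=
      PySem.Dict.getD_of_mem_items b hbmem hbnd ""
    have hvsne : p0.2 ≠ [] := hne _ hp0
    have hbc : b.contains (pvLastName a) = true := hcont.trans hc
    have hstepA : (pvStepA g a).items
        = g.items.map (fun p => if p.1 == pvLastName a then (pvLastName a, p0.2 ++ [a]) else p) := by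
      simp [pvStepA, PySem.Dict.modify, PySem.Dict.insert, hc, hvs]
    by_cases hlt : (pvPick p0.2).length < a.length
    · have hstepB : (pvStepB b a).items
          = b.items.map (fun p => if p.1 == pvLastName a then (pvLastName a, a) else p) := by
        simp [pvStepB, PySem.Dict.insert, hbc, hbget, hlt]
      refine ⟨?_, ?_, ?_⟩
      · rw [hstepB, hstepA, hbg, List.map_map, List.map_map]
        refine List.map_congr_left ?_
        intro p hp
        by_cases hk : p.1 = pvLastName a
        · simp [Function.comp, pvF, hk, pv_pick_append p0.2 hvsne a, pvMax2, hlt]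
        · simp [Function.comp, pvF, hk]
      · rw [hstepA, List.map_map]
        have hfst : ∀ p ∈ g.items,
            (Prod.fst ∘ fun p => if p.1 == pvLastName a then (pvLastName a, p0.2 ++ [a]) else p) p
              = Prod.fst p := by
          intro p hp
          by_cases hk : p.1 = pvLastName a <;> simp [Function.comp, hk]
        rw [List.map_congr_left hfst]
        exact hnd
      · intro q hq
        rw [hstepA] at hq
        obtain ⟨p, hp, rfl⟩ := List.mem_map.mp hq
        by_cases hk : p.1 = pvLastName a <;> simp [hk]
        exact hne _ hp
    · have hstepB : pvStepB b a = b := by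
        simp [pvStepB, hbc, hbget, hlt]
      refine ⟨?_, ?_, ?_⟩
      · rw [hstepB, hstepA, hbg, List.map_map]
        refine (List.map_congr_left ?_).symm
        intro p hp
        by_cases hk : p.1 = pvLastName a
        · have hpe : p = (pvLastName a, p0.2) := pv_fst_inj hnd hp hmem (by simpa using hk)
          subst hpe
          simp [Function.comp, pvF, pv_pick_append p0.2 hvsne a, pvMax2, hlt]
        · simp [Function.comp, pvF, hk]
      · rw [hstepA, List.map_map]
        have hfst : ∀ p ∈ g.items,
            (Prod.fst ∘ fun p => if p.1 == pvLastName a then (pvLastName a, p0.2 ++ [a]) else p) p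
              = Prod.fst p := by
          intro p hp
          by_cases hk : p.1 = pvLastName a <;> simp [Function.comp, hk]
        rw [List.map_congr_left hfst]
        exact hnd
      · intro q hq
        rw [hstepA] at hq
        obtain ⟨p, hp, rfl⟩ := List.mem_map.mp hq
        by_cases hk : p.1 = pvLastName a <;> simp [hk]
        exact hne _ hp
  · -- fresh key: both dicts append
    have hc' : g.contains (pvLastName a) = false := by simpa using hc
    have hbc : b.contains (pvLastName a) = false := hcont.trans hc'
    have hstepA : (pvStepA g a).items = g.items ++ [(pvLastName a, [a])] := by
      simp [pvStepA, PySem.Dict.modify, PySem.Dict.insert, hc',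
        PySem.Dict.getD_of_not_contains g [] hc']
    have hstepB : (pvStepB b a).items = b.items ++ [(pvLastName a, a)] := by
      simp [pvStepB, PySem.Dict.insert, hbc]
    have hnotmem : pvLastName a ∉ g.items.map Prod.fst := by
      intro hmem
      obtain ⟨p, hp, hpe⟩ := List.mem_map.mp hmem
      have : g.items.any (fun p => p.1 == pvLastName a) = true :=
        List.any_eq_true.mpr ⟨p, hp, by simpa using hpe⟩
      simp [PySem.Dict.contains, this] at hc'
    refine ⟨?_, ?_, ?_⟩
    · rw [hstepB, hstepA, hbg, List.map_append]
      have hpa : pvPick [a] = a := by rw [pv_pick_cons]; rfl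
      simp [pvF, hpa]
    · rw [hstepA, List.map_append]
      simp only [List.map_cons, List.map_nil]
      exact List.Nodup.append hnd (List.nodup_singleton _)
        (by simpa [List.disjoint_right] using hnotmem)
    · intro q hq
      rw [hstepA] at hq
      rcases List.mem_append.mp hq with hq1 | hq2
      · exact hne _ hq1
      · simp at hq2; simp [hq2]

lemma pv_loop_inv' : ∀ (L : List String) (g : PySem.Dict String (List String)) (b : PySem.Dict String String),
    pvInv g b → pvInv (L.foldl (fun d raw => pvStepA d (PySem.Str.strip raw)) g)
                      (L.foldl (fun d raw => pvStepB d (PySem.Str.strip raw)) b) := by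
  intro L
  induction L with
  | nil => intro g b h; exact h
  | cons x t ih => intro g b h; exact ih _ _ (pv_step_inv g b _ h)

lemma pv_foldl_append_acc (m : String → List String) : ∀ (vs : List String) (acc : List String),
    vs.foldl (fun acc v => if v ≠ "" then acc ++ m v else acc) acc
      = acc ++ vs.foldl (fun acc v => if v ≠ "" then acc ++ m v else acc) [] := by
  intro vs
  induction vs with
  | nil => intro acc; simp
  | cons v t ih =>
    intro acc
    simp only [List.foldl_cons]
    rw [ih (if v ≠ "" then acc ++ m v else acc), ih (if v ≠ "" then [] ++ m v else [])]
    by_cases hv : v = "" <;> simp [hv]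

lemma pv_outer_inv : ∀ (values : List String) (g : PySem.Dict String (List String)) (b : PySem.Dict String String),
    pvInv g b →
    pvInv ((values.foldl (fun acc value =>
              if value ≠ "" then acc ++ ((PySem.Str.split? value " and ").getD []).map PySem.Str.strip
              else acc) []).foldl pvStepA g)
          (values.foldl (fun d value =>
              if value ≠ "" then
                ((PySem.Str.split? value " and ").getD []).foldl (fun d raw => pvStepB d (PySem.Str.strip raw)) d
              else d) b) := by
  intro values
  induction values with
  | nil => intro g b h; exact h
  | cons v vs ih =>
    intro g b h
    simp only [List.foldl_cons]
    rw [pv_foldl_append_acc _ vs, List.foldl_append]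
    by_cases hv : v = ""
    · simp only [hv, ne_eq, not_true_eq_false, if_false]
      exact ih g b h
    · simp only [ne_eq, hv, not_false_eq_true, if_true, List.nil_append]
      refine ih _ _ ?_
      rw [List.foldl_map]
      exact pv_loop_inv' _ g b h

lemma pv_foldl_append_singleton {α β : Type} (h : α → β) : ∀ (l : List α) (init : List β),
    l.foldl (fun acc x => acc ++ [h x]) init = init ++ l.map h := by
  intro l
  induction l with
  | nil => intro init; simp
  | cons x t ih => intro init; simp [ih]

-- ===== VERDICT (by name: the statement is the Claim_ definition above) =====
theorem merge_authors_py_spec : Claim_equal_merge_authors_py := by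
  intro values _hdom
  show merge_authors_py values = merge_authors_py_alt values
  by_cases hv : values = []
  · subst hv; rfl
  · have hinv := pv_outer_inv values PySem.Dict.empty PySem.Dict.empty
      ⟨rfl, List.nodup_nil, by intro p hp; cases hp⟩
    obtain ⟨hbg, _, _⟩ := hinv
    unfold merge_authors_py merge_authors_py_alt
    simp only [if_neg hv]
    rw [pv_foldl_append_singleton (fun p : String × List String =>
      (PySem.List.sorted p.2 PySem.Str.len true).headD "")]
    simp only [List.nil_append, PySem.Dict.values, hbg, List.map_map]
    rfl
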